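-- pv_equiv track=rewrite | github.com/andrazjelenc/Text-Analyze | lib/Substrings.py | getRepetedSubstrings
-- ===== SOURCE A (Python) =====
-- def getRepetedSubstrings(ListOfWords):
-- 	AllSubstrings = []
-- 	# Fill list with all substrings lenght more than one
-- 	for Word in ListOfWords:
-- 		AllSubstrings.extend([Word[i:j+1] for i in range(len(Word)) for j in range(i+1,len(Word))])
--
-- 	Repeats = {}
-- 	# Count repeted substrings
-- 	for Substring in AllSubstrings:
-- 		if Substring not in Repeats:
-- 			Cnt = AllSubstrings.count(Substring)
-- 			if Cnt > 1:
-- 				Repeats[Substring] = Cnt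
-- 	# Remove substrings of larger substring
-- 	Substrings = list(Repeats.keys())
-- 	for Sstr in Substrings:
-- 		for Sstr2 in Repeats.keys():
-- 			if Sstr != Sstr2 and Sstr in Sstr2 and Repeats[Sstr] == Repeats[Sstr2]:
-- 				del Repeats[Sstr]
-- 				break
--
-- 	return Repeats
-- ===== SOURCE B (Python) =====
-- def getRepetedSubstrings(ListOfWords):
--     # Count every substring (length >= 2) in one dict pass; then, instead of
--     # testing each candidate for containment in others, INVERT the prune:
--     # each repeated substring t marks the strict substrings it dominates
--     # (its own sub-slices with the same count) as dead.  No `in` containment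
--     # search and no pairwise scan over the candidate set remain.
--     Counts = {}
--     for Word in ListOfWords:
--         n = len(Word)
--         for i in range(n):
--             for j in range(i + 1, n):
--                 s = Word[i:j + 1]
--                 Counts[s] = Counts.get(s, 0) + 1
--     Dead = set()
--     for t, c in Counts.items():
--         if c > 1:
--             m = len(t)
--             for i in range(m):
--                 for j in range(i + 1, m):
--                     u = t[i:j + 1]
--                     if u != t and Counts[u] == c:
--                         Dead.add(u)
--     return {s: c for s, c in Counts.items() if c > 1 and s not in Dead}
-- ===== Notes on version B (the rewrite author's own statement) =====
-- stated objective: faster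
-- what changed: B counts all substrings once with a dict and inverts the prune: instead of testing each candidate for containment inside every other key (A's pairwise `in` scans with live deletion), each repeated substring enumerates its own sub-slices and marks those with an equal count as dead; no substring-containment search and no candidate-vs-candidate scan remain.
import Mathlib
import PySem

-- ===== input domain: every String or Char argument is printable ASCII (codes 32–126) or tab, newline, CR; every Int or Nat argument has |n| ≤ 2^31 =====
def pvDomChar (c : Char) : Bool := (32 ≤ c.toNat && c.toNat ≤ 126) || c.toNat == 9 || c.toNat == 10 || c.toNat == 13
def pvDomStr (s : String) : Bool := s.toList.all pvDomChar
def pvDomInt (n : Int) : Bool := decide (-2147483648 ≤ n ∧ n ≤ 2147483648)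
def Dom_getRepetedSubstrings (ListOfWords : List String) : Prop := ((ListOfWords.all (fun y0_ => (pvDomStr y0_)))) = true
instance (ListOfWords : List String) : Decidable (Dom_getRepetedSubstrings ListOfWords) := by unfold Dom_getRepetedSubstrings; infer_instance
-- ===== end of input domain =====

-- B counts substrings once with a dict and inverts the prune (each repeated substring marks its own
-- sub-slices of equal count as dead) instead of A's repeated list.count scans and pairwise
-- containment deletion loop (objective: faster).

-- ===== PORT A =====
def getRepetedSubstrings (ListOfWords : List String) : List (String × Int) :=
  -- AllSubstrings.extend([Word[i:j+1] for i in range(len(Word)) for j in range(i+1,len(Word))])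
  let AllSubstrings : List String :=
    ListOfWords.foldl (fun acc Word =>
      acc ++ (PySem.List.pyRange 0 (PySem.Str.len Word) 1).flatMap (fun i =>
        (PySem.List.pyRange (i + 1) (PySem.Str.len Word) 1).map (fun j =>
          PySem.Str.slice Word (some i) (some (j + 1))))) []
  -- count repeated substrings ('Cnt = AllSubstrings.count(Substring)')
  let Repeats : PySem.Dict String Int :=
    AllSubstrings.foldl (fun d Substring =>
      if d.contains Substring then d
      else
        let Cnt : Int := (PySem.List.count AllSubstrings Substring : Int)
        if 1 < Cnt then d.insert Substring Cnt else d) PySem.Dict.empty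
  -- prune: for Sstr in list(Repeats.keys()): first Sstr2 still in Repeats with
  -- Sstr != Sstr2 and Sstr in Sstr2 and Repeats[Sstr] == Repeats[Sstr2] → del Repeats[Sstr], break
  -- (Repeats[k] on a present key ported as getD k 0 — exact here since both keys are present)
  let Substrings := Repeats.keys
  let Final : PySem.Dict String Int :=
    Substrings.foldl (fun d Sstr =>
      match d.keys.find? (fun Sstr2 =>
          Sstr != Sstr2 && PySem.Str.isIn Sstr Sstr2 && (d.getD Sstr 0 == d.getD Sstr2 0)) with
      | some _ => d.erase Sstr
      | none => d) Repeats
  Final.items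

-- ===== PORT B =====
def getRepetedSubstrings_alt (ListOfWords : List String) : List (String × Int) :=
  -- Counts[s] = Counts.get(s, 0) + 1 inside the three nested loops
  let Counts : PySem.Dict String Int :=
    ListOfWords.foldl (fun d Word =>
      (PySem.List.pyRange 0 (PySem.Str.len Word) 1).foldl (fun d i =>
        (PySem.List.pyRange (i + 1) (PySem.Str.len Word) 1).foldl (fun d j =>
          let s := PySem.Str.slice Word (some i) (some (j + 1))
          d.insert s (d.getD s 0 + 1)) d) d) PySem.Dict.empty
  -- each repeated substring t marks its own strict sub-slices of equal count as dead
  let Dead : PySem.Set String :=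
    Counts.items.foldl (fun D p =>
      if 1 < p.2 then
        (PySem.List.pyRange 0 (PySem.Str.len p.1) 1).foldl (fun D i =>
          (PySem.List.pyRange (i + 1) (PySem.Str.len p.1) 1).foldl (fun D j =>
            let u := PySem.Str.slice p.1 (some i) (some (j + 1))
            if u != p.1 && (Counts.getD u 0 == p.2) then PySem.Set.add D u else D) D) D
      else D) PySem.Set.empty
  -- {s: c for s, c in Counts.items() if c > 1 and s not in Dead}
  Counts.items.filter (fun p => decide (1 < p.2) && !(PySem.Set.contains Dead p.1))

-- ===== PRECONDITION & SPEC =====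
def Spec_getRepetedSubstrings (ListOfWords : List String) (out : List (String × Int)) : Prop := out = getRepetedSubstrings_alt ListOfWords
instance (ListOfWords : List String) (out : List (String × Int)) : Decidable (Spec_getRepetedSubstrings ListOfWords out) := by unfold Spec_getRepetedSubstrings; infer_instance

-- ===== CLAIM (what is proved, stated in full; the proofs are below) =====
def Claim_equal_getRepetedSubstrings : Prop := ∀ (ListOfWords : List String), Dom_getRepetedSubstrings ListOfWords → Spec_getRepetedSubstrings ListOfWords (getRepetedSubstrings ListOfWords)

-- ===== LEMMAS AND PROOFS =====

theorem pvFoldlInv {α σ : Type} (K : List α) (f : σ → α → σ) (inv : List α → σ)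
    (h : ∀ ys z zs, K = ys ++ z :: zs → f (inv ys) z = inv (ys ++ [z])) :
    ∀ zs ys, K = ys ++ zs → zs.foldl f (inv ys) = inv K := by
  intro zs
  induction zs with
  | nil =>
    intro ys hK
    rw [List.append_nil] at hK
    rw [List.foldl_nil, hK]
  | cons z zs ih =>
    intro ys hK
    rw [List.foldl_cons, h ys z zs hK]
    exact ih (ys ++ [z]) (by simpa using hK)

def pvF (AS ys : List String) : List (String × Int) :=
  ((PySem.Set.ofList ys).filter (fun s => decide (1 < (AS.count s : Int)))).map
    (fun s => (s, (AS.count s : Int)))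

-- step lemma for A's counting loop
theorem pvCountStep (AS ys : List String) (z : String) :
    (if (PySem.Dict.mk (pvF AS ys)).contains z then PySem.Dict.mk (pvF AS ys)
     else
       let Cnt : Int := (PySem.List.count AS z : Int)
       if 1 < Cnt then (PySem.Dict.mk (pvF AS ys)).insert z Cnt else PySem.Dict.mk (pvF AS ys))
    = PySem.Dict.mk (pvF AS (ys ++ [z])) := by
  have hcon : (PySem.Dict.mk (pvF AS ys)).contains z = decide (z ∈ ys ∧ 1 < AS.count z) := by
    rw [Bool.eq_iff_iff]
    simp [pvF, PySem.Dict.contains, List.any_map, List.any_filter, PySem.Set.mem_ofList]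
  have hF : pvF AS (ys ++ [z]) = if z ∈ ys then pvF AS ys
      else if 1 < AS.count z then pvF AS ys ++ [(z, (AS.count z : Int))] else pvF AS ys := by
    unfold pvF
    rw [PySem.Set.ofList_append_singleton]
    by_cases hz : z ∈ ys
    · rw [PySem.Set.add_of_mem (by simpa [PySem.Set.mem_ofList] using hz), if_pos hz]
    · rw [PySem.Set.add_of_not_mem (by simpa [PySem.Set.mem_ofList] using hz), if_neg hz]
      by_cases hc : 1 < AS.count z
      · simp [hc]
      · simp [hc]
  rw [hcon]
  by_cases hz : z ∈ ys
  · by_cases hc : 1 < AS.count z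
    · rw [if_pos (by simp [hz, hc]), hF, if_pos hz]
    · rw [if_neg (by simp [hc]), hF, if_pos hz]
      show (if (1:Int) < (PySem.List.count AS z : Int) then _ else _) = _
      rw [if_neg (by simp [PySem.List.count_eq]; omega)]
  · rw [if_neg (by simp [hz]), hF, if_neg hz]
    by_cases hc : 1 < AS.count z
    · show (if (1:Int) < (PySem.List.count AS z : Int) then _ else _) = _
      rw [if_pos (by simp [PySem.List.count_eq]; omega)]
      apply PySem.Dict.ext
      rw [PySem.Dict.items_insert_of_not_contains]
      · simp [PySem.List.count_eq, hc]
      · rw [hcon]; simp [hz]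
    · show (if (1:Int) < (PySem.List.count AS z : Int) then _ else _) = _
      rw [if_neg (by simp [PySem.List.count_eq]; omega)]
      apply PySem.Dict.ext
      simp [hc]

def pvMax (R : List (String × Int)) (p : String × Int) : Bool :=
  R.all (fun q => !(p.1 != q.1 && PySem.Str.isIn p.1 q.1 && (p.2 == q.2)))

theorem pvMax_false_iff (R : List (String × Int)) (p : String × Int) :
    pvMax R p = false ↔ ∃ q ∈ R, q.1 ≠ p.1 ∧ PySem.Str.isIn p.1 q.1 = true ∧ q.2 = p.2 := by
  rw [← Bool.not_eq_true, pvMax]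
  simp only [List.all_eq_true, Bool.not_eq_true', Bool.not_eq_false, Bool.and_eq_true,
    bne_iff_ne, beq_iff_eq, not_forall]
  constructor
  · rintro ⟨q, hq, ⟨h1, h2⟩, h3⟩; exact ⟨q, hq, h1.symm, h2, h3.symm⟩
  · rintro ⟨q, hq, h1, h2, h3⟩; exact ⟨q, hq, ⟨h1.symm, h2⟩, h3.symm⟩

theorem pvIsIn_strict {s t : String} (h : PySem.Str.isIn s t = true) (hne : t ≠ s) :
    s.toList.length < t.toList.length := by
  rw [PySem.Str.isIn_iff_infix] at h
  rcases Nat.lt_or_ge s.toList.length t.toList.length with hlt | hge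
  · exact hlt
  · exfalso
    have hle := h.length_le
    have heq := h.eq_of_length (by omega)
    exact hne (String.toList_inj.mp heq.symm)

theorem pvExistsMax (R : List (String × Int)) :
    ∀ n (p : String × Int), p ∈ R → R.countP (fun q => decide (p.1.toList.length < q.1.toList.length)) ≤ n →
    ∃ m ∈ R, pvMax R m = true ∧ PySem.Str.isIn p.1 m.1 = true ∧ m.2 = p.2 := by
  intro n
  induction n with
  | zero =>
    intro p hp _
    by_cases hm : pvMax R p = true
    · exact ⟨p, hp, hm, by rw [PySem.Str.isIn_iff_infix], rfl⟩
    · exfalso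
      rcases (pvMax_false_iff R p).mp (Bool.not_eq_true _ ▸ hm) with ⟨q, hq, hne, hin, _⟩
      have hlt := pvIsIn_strict hin hne
      have : 0 < R.countP (fun r => decide (p.1.toList.length < r.1.toList.length)) := by
        rw [List.countP_pos_iff]
        exact ⟨q, hq, by simpa using hlt⟩
      omega
  | succ n ih =>
    intro p hp hcnt
    by_cases hm : pvMax R p = true
    · exact ⟨p, hp, hm, by rw [PySem.Str.isIn_iff_infix], rfl⟩
    · rcases (pvMax_false_iff R p).mp (Bool.not_eq_true _ ▸ hm) with ⟨q, hq, hne, hin, hc⟩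
      have hlt := pvIsIn_strict hin hne
      have hmono : R.countP (fun r => decide (q.1.toList.length < r.1.toList.length)) <
          R.countP (fun r => decide (p.1.toList.length < r.1.toList.length)) := by
        clear ih hcnt hm hc hp
        induction R with
        | nil => simp at hq
        | cons a R ihR =>
          rw [List.countP_cons, List.countP_cons]
          have hmR := List.countP_mono_left (l := R)
            (p := fun r => decide (q.1.toList.length < r.1.toList.length))
            (q := fun r => decide (p.1.toList.length < r.1.toList.length))
            (fun x _ hx => by simp only [decide_eq_true_eq] at hx ⊢; omega)
          rcases List.mem_cons.mp hq with rfl | ha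
          · split_ifs <;> simp only [decide_eq_true_eq] at * <;> omega
          · have hR := ihR ha
            split_ifs <;> simp only [decide_eq_true_eq] at * <;> omega
      rcases ih q hq (by omega) with ⟨m, hm1, hm2, hm3, hm4⟩
      refine ⟨m, hm1, hm2, ?_, by omega⟩
      rw [PySem.Str.isIn_iff_infix] at hin hm3 ⊢
      exact hin.trans hm3

def pvPhi (R : List (String × Int)) (ys : List String) (p : String × Int) : Bool :=
  !(decide (p.1 ∈ ys)) || pvMax R p

theorem pvMem_keys_mk (F : List (String × Int)) (t : String) :
    t ∈ (PySem.Dict.mk F).keys ↔ ∃ v, (t, v) ∈ F := by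
  simp [PySem.Dict.keys, List.mem_map]

theorem pvPruneStep (R : List (String × Int)) (hnd : (R.map Prod.fst).Nodup)
    (ys : List String) (z : String) (zs : List String) (hK : R.map Prod.fst = ys ++ z :: zs) :
    (fun (d : PySem.Dict String Int) (Sstr : String) =>
      match d.keys.find? (fun Sstr2 =>
          Sstr != Sstr2 && PySem.Str.isIn Sstr Sstr2 && (d.getD Sstr 0 == d.getD Sstr2 0)) with
      | some _ => d.erase Sstr
      | none => d) (PySem.Dict.mk (R.filter (pvPhi R ys))) z
    = PySem.Dict.mk (R.filter (pvPhi R (ys ++ [z]))) := by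
  have hndK : (ys ++ z :: zs).Nodup := hK ▸ hnd
  have hzys : z ∉ ys := by
    intro hzy
    exact List.disjoint_of_nodup_append hndK hzy (by simp)
  have hzR : ∃ c, (z, c) ∈ R := by
    have : z ∈ R.map Prod.fst := by rw [hK]; simp
    rcases List.mem_map.mp this with ⟨p, hp, hp1⟩
    refine ⟨p.2, ?_⟩
    rw [← hp1]
    exact hp
  rcases hzR with ⟨c, hzc⟩
  -- uniqueness of the pair with key z
  have huniq : ∀ p ∈ R, p.1 = z → p = (z, c) := by
    intro p hp hp1
    exact List.inj_on_of_nodup_map hnd hp hzc (by simpa using hp1)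
  set F := R.filter (pvPhi R ys) with hFdef
  have hndF : (F.map Prod.fst).Nodup := ((List.filter_sublist).map Prod.fst).nodup hnd
  have hkeysF : (PySem.Dict.mk F).keys = F.map Prod.fst := rfl
  have hgetD : ∀ {k : String} {v : Int}, (k, v) ∈ F → (PySem.Dict.mk F).getD k 0 = v := by
    intro k v hkv
    exact PySem.Dict.getD_of_mem_items _ hkv (hkeysF ▸ hndF) 0
  have hzF : (z, c) ∈ F := List.mem_filter.mpr ⟨hzc, by simp [pvPhi, hzys]⟩
  have hgz : (PySem.Dict.mk F).getD z 0 = c := hgetD hzF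
  by_cases hmax : pvMax R (z, c) = true
  · -- z is group-maximal: nothing found, nothing deleted
    have hnone : (PySem.Dict.mk F).keys.find? (fun Sstr2 =>
        z != Sstr2 && PySem.Str.isIn z Sstr2 && ((PySem.Dict.mk F).getD z 0 == (PySem.Dict.mk F).getD Sstr2 0)) = none := by
      rw [List.find?_eq_none]
      intro t ht hpred
      rcases (pvMem_keys_mk F t).mp ht with ⟨v, htv⟩
      have htR : (t, v) ∈ R := List.mem_of_mem_filter htv
      simp only [Bool.and_eq_true, bne_iff_ne, beq_iff_eq] at hpred
      rcases hpred with ⟨⟨hne, hin⟩, heq⟩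
      rw [hgz, hgetD htv] at heq
      have hfalse : pvMax R (z, c) = false := (pvMax_false_iff R (z, c)).mpr
        ⟨(t, v), htR, by simpa using hne.symm, by simpa using hin, by simpa using heq.symm⟩
      rw [hmax] at hfalse
      exact absurd hfalse (by simp)
    simp only [hnone]
    apply PySem.Dict.ext
    show F = _
    rw [hFdef]
    apply List.filter_congr
    intro p hp
    by_cases hpz : p.1 = z
    · have hpzc := huniq p hp hpz
      subst hpzc
      simp [pvPhi, hzys, hmax]
    · simp [pvPhi, List.mem_append, hpz]
  · -- z is not maximal: a maximal super-entry of equal count is found; z is deleted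
    rcases pvExistsMax R (R.countP (fun q => decide ((z, c).1.toList.length < q.1.toList.length)))
      (z, c) hzc (Nat.le_refl _) with ⟨m, hmR, hmaxm, hin, hm2⟩
    have hmz : m.1 ≠ z := by
      intro h
      rw [huniq m hmR h] at hmaxm
      exact hmax hmaxm
    have hmF : m ∈ F := List.mem_filter.mpr ⟨hmR, by simp [pvPhi, hmaxm]⟩
    have hmkeys : m.1 ∈ (PySem.Dict.mk F).keys := (pvMem_keys_mk F m.1).mpr ⟨m.2, by simpa using hmF⟩
    have hgm : (PySem.Dict.mk F).getD m.1 0 = m.2 := hgetD (by simpa using hmF)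
    have hpredm : (fun Sstr2 =>
        z != Sstr2 && PySem.Str.isIn z Sstr2 && ((PySem.Dict.mk F).getD z 0 == (PySem.Dict.mk F).getD Sstr2 0)) m.1 = true := by
      simp only [Bool.and_eq_true, bne_iff_ne, beq_iff_eq]
      exact ⟨⟨hmz.symm, hin⟩, by rw [hgz, hgm, hm2]⟩
    cases hfind : (PySem.Dict.mk F).keys.find? (fun Sstr2 =>
        z != Sstr2 && PySem.Str.isIn z Sstr2 && ((PySem.Dict.mk F).getD z 0 == (PySem.Dict.mk F).getD Sstr2 0)) with
    | none =>
      exact absurd hpredm (by simpa using List.find?_eq_none.mp hfind m.1 hmkeys)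
    | some w =>
      simp only [hfind]
      apply PySem.Dict.ext
      show F.filter (fun p => !(p.1 == z)) = _
      rw [hFdef, List.filter_filter]
      apply List.filter_congr
      intro p hp
      by_cases hpz : p.1 = z
      · have hpzc := huniq p hp hpz
        subst hpzc
        simp [pvPhi, Bool.eq_false_iff.mpr hmax]
      · simp [pvPhi, List.mem_append, hpz]

theorem pvPruneLoop (R : List (String × Int)) (hnd : (R.map Prod.fst).Nodup) :
    ((R.map Prod.fst).foldl (fun (d : PySem.Dict String Int) (Sstr : String) =>
      match d.keys.find? (fun Sstr2 =>
          Sstr != Sstr2 && PySem.Str.isIn Sstr Sstr2 && (d.getD Sstr 0 == d.getD Sstr2 0)) with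
      | some _ => d.erase Sstr
      | none => d) (PySem.Dict.mk R)).items = R.filter (pvMax R) := by
  have h0 : R.filter (pvPhi R []) = R := List.filter_eq_self.mpr (fun p _ => by simp [pvPhi])
  have h := pvFoldlInv (R.map Prod.fst)
    (fun (d : PySem.Dict String Int) (Sstr : String) =>
      match d.keys.find? (fun Sstr2 =>
          Sstr != Sstr2 && PySem.Str.isIn Sstr Sstr2 && (d.getD Sstr 0 == d.getD Sstr2 0)) with
      | some _ => d.erase Sstr
      | none => d) (fun ys => PySem.Dict.mk (R.filter (pvPhi R ys)))
    (fun ys z zs hK => pvPruneStep R hnd ys z zs hK) (R.map Prod.fst) [] (by simp)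
  simp only at h
  rw [h0] at h
  rw [h]
  show R.filter (pvPhi R (R.map Prod.fst)) = _
  apply List.filter_congr
  intro p hp
  have : p.1 ∈ R.map Prod.fst := List.mem_map.mpr ⟨p, hp, rfl⟩
  simp [pvPhi, this]

def pvAS (L : List String) : List String :=
  L.flatMap (fun Word =>
    (PySem.List.pyRange 0 (PySem.Str.len Word) 1).flatMap (fun i =>
      (PySem.List.pyRange (i + 1) (PySem.Str.len Word) 1).map (fun j =>
        PySem.Str.slice Word (some i) (some (j + 1)))))

theorem pvFnd (AS : List String) : ((pvF AS AS).map Prod.fst).Nodup := by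
  unfold pvF
  rw [List.map_map]
  have h : (Prod.fst ∘ fun s => (s, (AS.count s : Int))) = id := rfl
  rw [h, List.map_id]
  exact (PySem.Set.nodup_ofList AS).filter _

theorem pvA_eq (L : List String) :
    getRepetedSubstrings L
      = (pvF (pvAS L) (pvAS L)).filter (pvMax (pvF (pvAS L) (pvAS L))) := by
  unfold getRepetedSubstrings
  simp only [PySem.List.foldl_append_eq_flatMap, List.nil_append]
  have hAS : pvAS L = L.flatMap (fun Word =>
      (PySem.List.pyRange 0 (PySem.Str.len Word) 1).flatMap (fun i =>
        (PySem.List.pyRange (i + 1) (PySem.Str.len Word) 1).map (fun j =>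
          PySem.Str.slice Word (some i) (some (j + 1))))) := rfl
  rw [← hAS]
  have hRep : (pvAS L).foldl (fun d Substring =>
      if d.contains Substring then d
      else
        let Cnt : Int := (PySem.List.count (pvAS L) Substring : Int)
        if 1 < Cnt then d.insert Substring Cnt else d) PySem.Dict.empty
      = PySem.Dict.mk (pvF (pvAS L) (pvAS L)) := by
    have h := pvFoldlInv (pvAS L) (fun d Substring =>
      if d.contains Substring then d
      else
        let Cnt : Int := (PySem.List.count (pvAS L) Substring : Int)
        if 1 < Cnt then d.insert Substring Cnt else d)
      (fun ys => PySem.Dict.mk (pvF (pvAS L) ys))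
      (fun ys z zs _ => pvCountStep (pvAS L) ys z) (pvAS L) [] rfl
    exact h
  rw [hRep]
  have hkeys : (PySem.Dict.mk (pvF (pvAS L) (pvAS L))).keys
      = (pvF (pvAS L) (pvAS L)).map Prod.fst := rfl
  rw [hkeys]
  exact pvPruneLoop _ (pvFnd (pvAS L))


theorem pvSliceProps (w : String) (i j : Int)
    (hi : i ∈ PySem.List.pyRange 0 (PySem.Str.len w) 1)
    (hj : j ∈ PySem.List.pyRange (i + 1) (PySem.Str.len w) 1) :
    (PySem.Str.slice w (some i) (some (j + 1))).toList <:+: w.toList ∧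
      2 ≤ (PySem.Str.slice w (some i) (some (j + 1))).toList.length := by
  rw [PySem.List.mem_pyRange_one] at hi hj
  have hlen : PySem.Str.len w = (w.toList.length : Int) := by simp [pysem]
  rw [hlen] at hi hj
  have h1 : (PySem.Str.slice w (some i) (some (j + 1))).toList
      = (w.toList.drop i.toNat).take ((j + 1).toNat - i.toNat) := by
    have : (PySem.Str.slice w (some i) (some (j + 1))).toList
        = PySem.List.slice w.toList (some i) (some (j + 1)) := by simp [pysem]
    rw [this, PySem.List.slice_toNat w.toList (by omega) (by omega)]
  rw [h1]
  constructor
  · exact ((w.toList.drop i.toNat).take_prefix _).isInfix.trans (w.toList.drop_suffix i.toNat).isInfix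
  · rw [List.length_take, List.length_drop]
    omega

theorem pvSliceEx (w s : String) (h2 : 2 ≤ s.toList.length) (hinf : s.toList <:+: w.toList) :
    ∃ i j : Int, i ∈ PySem.List.pyRange 0 (PySem.Str.len w) 1 ∧
      j ∈ PySem.List.pyRange (i + 1) (PySem.Str.len w) 1 ∧
      PySem.Str.slice w (some i) (some (j + 1)) = s := by
  rcases hinf with ⟨a, b, hab⟩
  have hlen : PySem.Str.len w = (w.toList.length : Int) := by simp [pysem]
  have hwl : w.toList.length = a.length + s.toList.length + b.length := by
    rw [← hab]; simp; omega
  refine ⟨(a.length : Int), (a.length : Int) + (s.toList.length : Int) - 1, ?_, ?_, ?_⟩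
  · rw [PySem.List.mem_pyRange_one, hlen]; omega
  · rw [PySem.List.mem_pyRange_one, hlen]; omega
  · apply String.toList_inj.mp
    have : (a.length : Int) + (s.toList.length : Int) - 1 + 1
        = ((a.length + s.toList.length : Nat) : Int) := by push_cast; ring
    rw [this]
    have hb : (PySem.Str.slice w (some (a.length : Int)) (some ((a.length + s.toList.length : Nat) : Int))).toList
        = PySem.List.slice w.toList (some (a.length : Int)) (some ((a.length + s.toList.length : Nat) : Int)) := by
      simp [pysem]
    rw [hb, PySem.List.slice_natCast]
    rw [← hab]
    rw [show a.length + s.toList.length - a.length = s.toList.length by omega]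
    rw [List.append_assoc, List.drop_left, List.take_left]


theorem pvFoldlFlatMap {α β γ : Type} (f : α → List β) (g : γ → β → γ) (l : List α) (init : γ) :
    (l.flatMap f).foldl g init = l.foldl (fun a x => (f x).foldl g a) init := by
  induction l generalizing init with
  | nil => rfl
  | cons x xs ih => simp [List.flatMap_cons, List.foldl_append, ih]

theorem pvMemFoldlAddIf {α β : Type} [BEq α] [LawfulBEq α] (l : List β) (q : β → Bool)
    (f : β → α) (s : α) :
    ∀ D : PySem.Set α, s ∈ l.foldl (fun D x => if q x then PySem.Set.add D (f x) else D) D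
      ↔ s ∈ D ∨ ∃ x ∈ l, q x = true ∧ f x = s := by
  induction l with
  | nil => intro D; simp
  | cons x xs ih =>
    intro D
    rw [List.foldl_cons]
    by_cases hq : q x = true
    · rw [if_pos hq, ih, PySem.Set.mem_add]
      constructor
      · rintro (⟨h | h⟩ | ⟨y, hy, h1, h2⟩)
        · exact Or.inl h
        · exact Or.inr ⟨x, by simp, hq, h.symm⟩
        · exact Or.inr ⟨y, by simp [hy], h1, h2⟩
      · rintro (h | ⟨y, hy, h1, h2⟩)
        · exact Or.inl (Or.inl h)
        · rcases List.mem_cons.mp hy with rfl | hy'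
          · exact Or.inl (Or.inr h2.symm)
          · exact Or.inr ⟨y, hy', h1, h2⟩
    · rw [if_neg hq, ih]
      constructor
      · rintro (h | ⟨y, hy, h1, h2⟩)
        · exact Or.inl h
        · exact Or.inr ⟨y, by simp [hy], h1, h2⟩
      · rintro (h | ⟨y, hy, h1, h2⟩)
        · exact Or.inl h
        · rcases List.mem_cons.mp hy with rfl | hy'
          · exact absurd h1 hq
          · exact Or.inr ⟨y, hy', h1, h2⟩

def pvPairs (n : Int) : List (Int × Int) :=
  (PySem.List.pyRange 0 n 1).flatMap (fun i =>
    (PySem.List.pyRange (i + 1) n 1).map (fun j => (i, j)))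

theorem pvMemPairs (n : Int) (ij : Int × Int) :
    ij ∈ pvPairs n ↔ ij.1 ∈ PySem.List.pyRange 0 n 1 ∧ ij.2 ∈ PySem.List.pyRange (ij.1 + 1) n 1 := by
  rcases ij with ⟨i, j⟩
  simp only [pvPairs, List.mem_flatMap, List.mem_map]
  constructor
  · rintro ⟨i', hi', j', hj', h⟩
    cases h
    exact ⟨hi', hj'⟩
  · rintro ⟨hi, hj⟩
    exact ⟨i, hi, j, hj, rfl⟩

def pvSl (p : String × Int) (ij : Int × Int) : String :=
  PySem.Str.slice p.1 (some ij.1) (some (ij.2 + 1))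

def pvCond (C : PySem.Dict String Int) (p : String × Int) (ij : Int × Int) : Bool :=
  (pvSl p ij != p.1) && (C.getD (pvSl p ij) 0 == p.2)

def pvStep (C : PySem.Dict String Int) (D : PySem.Set String) (p : String × Int) : PySem.Set String :=
  if 1 < p.2 then
    (PySem.List.pyRange 0 (PySem.Str.len p.1) 1).foldl (fun D i =>
      (PySem.List.pyRange (i + 1) (PySem.Str.len p.1) 1).foldl (fun D j =>
        let u := PySem.Str.slice p.1 (some i) (some (j + 1))
        if u != p.1 && (C.getD u 0 == p.2) then PySem.Set.add D u else D) D) D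
  else D

theorem pvStepMem (C : PySem.Dict String Int) (D : PySem.Set String) (p : String × Int) (s : String) :
    s ∈ pvStep C D p ↔ s ∈ D ∨ (1 < p.2 ∧ ∃ ij ∈ pvPairs (PySem.Str.len p.1),
      pvCond C p ij = true ∧ pvSl p ij = s) := by
  unfold pvStep
  by_cases h : 1 < p.2
  · rw [if_pos h]
    have hfold : (PySem.List.pyRange 0 (PySem.Str.len p.1) 1).foldl (fun D i =>
        (PySem.List.pyRange (i + 1) (PySem.Str.len p.1) 1).foldl (fun D j =>
          let u := PySem.Str.slice p.1 (some i) (some (j + 1))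
          if u != p.1 && (C.getD u 0 == p.2) then PySem.Set.add D u else D) D) D
        = (pvPairs (PySem.Str.len p.1)).foldl
            (fun D ij => if pvCond C p ij then PySem.Set.add D (pvSl p ij) else D) D := by
      rw [pvPairs, pvFoldlFlatMap]
      simp only [List.foldl_map, pvCond, pvSl]
    rw [hfold, pvMemFoldlAddIf]
    simp [h]
  · rw [if_neg h]
    simp [h]

theorem pvDeadMem (C : PySem.Dict String Int) (l : List (String × Int)) (s : String) :
    ∀ D : PySem.Set String, s ∈ l.foldl (pvStep C) D
      ↔ s ∈ D ∨ ∃ p ∈ l, 1 < p.2 ∧ ∃ ij ∈ pvPairs (PySem.Str.len p.1),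
          pvCond C p ij = true ∧ pvSl p ij = s := by
  induction l with
  | nil => intro D; simp
  | cons x xs ih =>
    intro D
    rw [List.foldl_cons, ih, pvStepMem]
    constructor
    · rintro (⟨h | h⟩ | ⟨y, hy, hrest⟩)
      · exact Or.inl h
      · exact Or.inr ⟨x, by simp, h⟩
      · exact Or.inr ⟨y, by simp [hy], hrest⟩
    · rintro (h | ⟨y, hy, hrest⟩)
      · exact Or.inl (Or.inl h)
      · rcases List.mem_cons.mp hy with rfl | hy'
        · exact Or.inl (Or.inr hrest)
        · exact Or.inr ⟨y, hy', hrest⟩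


theorem pvMemF (AS : List String) (p : String × Int) :
    p ∈ pvF AS AS ↔ p.1 ∈ AS ∧ 1 < (AS.count p.1 : Int) ∧ p.2 = (AS.count p.1 : Int) := by
  rcases p with ⟨a, c⟩
  unfold pvF
  simp only [List.mem_map, List.mem_filter, decide_eq_true_eq, PySem.Set.mem_ofList, Prod.mk.injEq]
  constructor
  · rintro ⟨s, ⟨hs, hc⟩, rfl, rfl⟩
    exact ⟨hs, hc, rfl⟩
  · rintro ⟨hs, hc, rfl⟩
    exact ⟨a, ⟨hs, hc⟩, rfl, rfl⟩

theorem pvASlen (L : List String) (x : String) (hx : x ∈ pvAS L) : 2 ≤ x.toList.length := by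
  unfold pvAS at hx
  simp only [List.mem_flatMap, List.mem_map] at hx
  obtain ⟨w, _, i, hi, j, hj, rfl⟩ := hx
  exact (pvSliceProps w i j hi hj).2

theorem pvHitIff (C : PySem.Dict String Int) (q : String × Int) (s : String)
    (h2 : 2 ≤ s.toList.length) :
    (∃ ij ∈ pvPairs (PySem.Str.len q.1), pvCond C q ij = true ∧ pvSl q ij = s)
    ↔ (s.toList <:+: q.1.toList ∧ s ≠ q.1 ∧ C.getD s 0 = q.2) := by
  constructor
  · rintro ⟨ij, hij, hcond, rfl⟩
    rw [pvMemPairs] at hij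
    have hprops := pvSliceProps q.1 ij.1 ij.2 hij.1 hij.2
    unfold pvCond at hcond
    simp only [Bool.and_eq_true, bne_iff_ne, beq_iff_eq] at hcond
    exact ⟨hprops.1, hcond.1, hcond.2⟩
  · rintro ⟨hinf, hne, hgd⟩
    rcases pvSliceEx q.1 s h2 hinf with ⟨i, j, hi, hj, he⟩
    have hsl : pvSl q (i, j) = s := he
    refine ⟨(i, j), (pvMemPairs _ _).mpr ⟨hi, hj⟩, ?_, hsl⟩
    unfold pvCond
    rw [hsl]
    simp only [Bool.and_eq_true, bne_iff_ne, beq_iff_eq]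
    exact ⟨hne, hgd⟩

theorem pvB_eq (L : List String) :
    getRepetedSubstrings_alt L
      = (pvF (pvAS L) (pvAS L)).filter (pvMax (pvF (pvAS L) (pvAS L))) := by
  unfold getRepetedSubstrings_alt
  have hCounts : L.foldl (fun d Word =>
      (PySem.List.pyRange 0 (PySem.Str.len Word) 1).foldl (fun d i =>
        (PySem.List.pyRange (i + 1) (PySem.Str.len Word) 1).foldl (fun d j =>
          let s := PySem.Str.slice Word (some i) (some (j + 1))
          d.insert s (d.getD s 0 + 1)) d) d) PySem.Dict.empty
      = PySem.Dict.counter (pvAS L) := by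
    rw [← PySem.Dict.foldl_insert_getD_add_one_eq_counter]
    unfold pvAS
    simp only [pvFoldlFlatMap, List.foldl_map]
  simp only []
  rw [hCounts]
  show (PySem.Dict.counter (pvAS L)).items.filter (fun p => decide (1 < p.2) &&
      !(PySem.Set.contains ((PySem.Dict.counter (pvAS L)).items.foldl
          (pvStep (PySem.Dict.counter (pvAS L))) PySem.Set.empty) p.1)) = _
  set AS := pvAS L with hASdef
  set C := PySem.Dict.counter AS with hCdef
  set Dead := C.items.foldl (pvStep C) PySem.Set.empty with hDeaddef
  set R := pvF AS AS with hRdef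
  have hfilter : C.items.filter (fun p => decide (1 < p.2)) = R := by
    rw [hCdef, PySem.Dict.items_counter, List.filter_map]
    rfl
  rw [← List.filter_filter, List.filter_comm, hfilter]
  apply List.filter_congr
  intro p hp
  rcases (pvMemF AS p).mp (hRdef ▸ hp) with ⟨hmem, hcnt, hp2⟩
  have h2 : 2 ≤ p.1.toList.length := pvASlen L p.1 (hASdef ▸ hmem)
  have hgp : C.getD p.1 0 = p.2 := by
    rw [hCdef, PySem.Dict.getD_counter, hp2]
  have hmemR : ∀ q : String × Int, q ∈ C.items ∧ 1 < q.2 ↔ q ∈ R := by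
    intro q
    rw [← hfilter, List.mem_filter, decide_eq_true_eq]
  have hiff : PySem.Set.contains Dead p.1 = true ↔ pvMax R p = false := by
    rw [PySem.Set.contains_iff, hDeaddef, pvDeadMem, pvMax_false_iff]
    constructor
    · rintro (h | ⟨q, hqI, hq2, hhit⟩)
      · exact absurd h (by simp [PySem.Set.empty])
      · rcases (pvHitIff C q p.1 h2).mp hhit with ⟨hinf, hne, hgd⟩
        refine ⟨q, (hmemR q).mp ⟨hqI, hq2⟩, fun h => hne h.symm, ?_, ?_⟩
        · rw [PySem.Str.isIn_iff_infix]; exact hinf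
        · rw [← hgd, hgp]
    · rintro ⟨q, hqR, hne, hin, hq2⟩
      rcases (hmemR q).mpr hqR with ⟨hqI, hq2'⟩
      refine Or.inr ⟨q, hqI, hq2', (pvHitIff C q p.1 h2).mpr ?_⟩
      refine ⟨?_, fun h => hne h.symm, ?_⟩
      · rw [← PySem.Str.isIn_iff_infix]; exact hin
      · rw [hgp, hq2]
  cases hm : pvMax R p with
  | false =>
    rw [hiff.mpr hm]
    rfl
  | true =>
    cases hd : PySem.Set.contains Dead p.1 with
    | false => rfl
    | true =>
      rw [hiff.mp hd] at hm
      exact absurd hm (by simp)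

-- ===== VERDICT (by name: the statement is the Claim_ definition above) =====
theorem getRepetedSubstrings_spec : Claim_equal_getRepetedSubstrings := by
  intro L _
  unfold Spec_getRepetedSubstrings
  rw [pvA_eq, pvB_eq]
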